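-- pv_equiv track=rewrite | github.com/Chissanu/KMITL | PCA/Week4/main.py | m06
-- ===== SOURCE A (Python) =====
-- def m06(n: int):
--     round1s = 0
--     sum = 0
--     while round1s < n:
--         round2s = 0
--         while round2s < (n*n):
--             sum += 1
--             round2s += 1
--         round1s += 1
--     return sum
-- ===== SOURCE B (Python) =====
-- def m06(n: int):
--     return n ** 3 if n > 0 else 0
-- ===== Notes on version B (the rewrite author's own statement) =====
-- stated objective: faster
-- what changed: Replaced the doubly nested counting loops (n outer iterations, n*n inner increments) by the closed form n**3 for n > 0 and 0 otherwise.
import Mathlib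
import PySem

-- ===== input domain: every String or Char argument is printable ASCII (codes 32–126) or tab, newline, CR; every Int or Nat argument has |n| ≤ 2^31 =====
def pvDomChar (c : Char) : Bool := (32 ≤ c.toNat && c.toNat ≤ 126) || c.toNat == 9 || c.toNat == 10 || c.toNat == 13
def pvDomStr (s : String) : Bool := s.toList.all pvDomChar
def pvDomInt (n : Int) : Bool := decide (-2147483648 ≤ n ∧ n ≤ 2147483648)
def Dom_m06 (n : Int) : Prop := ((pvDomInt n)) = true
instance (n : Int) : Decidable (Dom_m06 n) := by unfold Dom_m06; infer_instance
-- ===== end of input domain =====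

-- B replaces A's nested counting loops by the closed form n^3 (0 for n ≤ 0): same value, O(1).

-- ===== PORT A =====
-- inner while loop: while round2s < nn: sum += 1; round2s += 1
def m06Inner (nn round2s sum : Int) : Int :=
  if round2s < nn then m06Inner nn (round2s + 1) (sum + 1) else sum
termination_by (nn - round2s).toNat
decreasing_by omega

-- outer while loop: while round1s < n: <inner loop from round2s = 0>; round1s += 1
def m06Outer (n round1s sum : Int) : Int :=
  if round1s < n then m06Outer n (round1s + 1) (m06Inner (n * n) 0 sum) else sum
termination_by (n - round1s).toNat
decreasing_by omega

def m06 (n : Int) : Int := m06Outer n 0 0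

-- ===== PORT B =====
def m06_alt (n : Int) : Int := if n > 0 then n ^ 3 else 0

-- ===== PRECONDITION & SPEC =====
def Spec_m06 (n : Int) (out : Int) : Prop := out = m06_alt n
instance (n : Int) (out : Int) : Decidable (Spec_m06 n out) := by unfold Spec_m06; infer_instance

-- ===== CLAIM (what is proved, stated in full; the proofs are below) =====
def Claim_equal_m06 : Prop := ∀ (n : Int), Dom_m06 n → Spec_m06 n (m06 n)

-- ===== LEMMAS AND PROOFS =====
theorem m06Inner_eq (nn : Int) : ∀ (k : Nat) (r s : Int), (nn - r).toNat = k →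
    m06Inner nn r s = s + k := by
  intro k
  induction k with
  | zero =>
      intro r s hk
      rw [m06Inner]
      have : ¬ r < nn := by omega
      simp [this]
  | succ k ih =>
      intro r s hk
      rw [m06Inner]
      have hlt : r < nn := by omega
      rw [if_pos hlt, ih (r + 1) (s + 1) (by omega)]
      push_cast
      ring

theorem m06Outer_eq (n : Int) : ∀ (k : Nat) (r s : Int), (n - r).toNat = k →
    m06Outer n r s = s + k * (n * n) := by
  intro k
  induction k with
  | zero =>
      intro r s hk
      rw [m06Outer]
      have : ¬ r < n := by omega
      simp [this]
  | succ k ih =>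
      intro r s hk
      rw [m06Outer]
      have hlt : r < n := by omega
      have hin : m06Inner (n * n) 0 s = s + ((n * n - 0).toNat : Int) :=
        m06Inner_eq (n * n) (n * n - 0).toNat 0 s rfl
      have hnn : ((n * n - 0).toNat : Int) = n * n := by
        have : 0 ≤ n * n := mul_self_nonneg n
        omega
      rw [if_pos hlt, ih (r + 1) (m06Inner (n * n) 0 s) (by omega), hin, hnn]
      push_cast
      ring

-- ===== VERDICT (by name: the statement is the Claim_ definition above) =====
theorem m06_spec : Claim_equal_m06 := by
  intro n _
  unfold Spec_m06 m06 m06_alt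
  have h := m06Outer_eq n (n - 0).toNat 0 0 rfl
  by_cases hn : 0 < n
  · have hcast : ((n - 0).toNat : Int) = n := by omega
    rw [h, hcast, if_pos hn]
    ring
  · have hz : (n - 0).toNat = 0 := by omega
    rw [hz] at h
    rw [if_neg hn, h]
    ring
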